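-- pv_equiv track=rewrite | github.com/miliar/Code_Jam_Webscraper | solutions_python/solutions_year16_round0_nr2/4043.py | remove_last_pluses
-- ===== SOURCE A (Python) =====
-- def remove_last_pluses(my_list):
--     if my_list[-1] == '+':
--         my_list.pop()
--         if my_list :
--             return remove_last_pluses(my_list)
--         else :
--             return []
--     else :
--         return my_list
-- ===== SOURCE B (Python) =====
-- def remove_last_pluses(my_list):
--     i = len(my_list)
--     while i > 0 and my_list[i - 1] == '+':
--         i -= 1
--     del my_list[i:]
--     return my_list
-- ===== Notes on version B (the rewrite author's own statement) =====
-- stated objective: simpler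
-- what changed: Replaces the tail recursion with pop() by a single backward index scan that finds the cut point and truncates once with one slice deletion.
-- crash fix: On the empty list A raises IndexError from my_list[-1]; B returns []. — e.g. on remove_last_pluses([]): A raises IndexError, B returns []
import Mathlib
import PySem

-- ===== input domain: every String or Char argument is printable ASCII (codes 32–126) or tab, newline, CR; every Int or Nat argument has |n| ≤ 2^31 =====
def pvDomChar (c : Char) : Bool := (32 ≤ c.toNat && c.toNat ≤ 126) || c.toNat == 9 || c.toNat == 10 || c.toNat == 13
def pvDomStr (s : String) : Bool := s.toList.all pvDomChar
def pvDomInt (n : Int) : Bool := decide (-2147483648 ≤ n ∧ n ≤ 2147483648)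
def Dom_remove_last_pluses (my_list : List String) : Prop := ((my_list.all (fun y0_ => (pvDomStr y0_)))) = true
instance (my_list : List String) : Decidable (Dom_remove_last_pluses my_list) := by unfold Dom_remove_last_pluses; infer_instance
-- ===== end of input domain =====

-- ===== PORT A =====
-- B is a backward index scan with one truncation instead of A's pop-recursion; A (and B)
-- mutate the argument in place in Python — the equivalence proved here is about the return value.
-- Port of A: `my_list[-1] == '+'` is pyGet? (-1) compared to some "+"; `pop()` is dropLast.
def remove_last_pluses (my_list : List String) : List String :=
  if h : PySem.List.pyGet? my_list (-1) = some "+" then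
    if _hne : my_list.dropLast ≠ [] then remove_last_pluses my_list.dropLast
    else []
  else my_list
termination_by my_list.length
decreasing_by
  have hne : my_list ≠ [] := by
    intro he; subst he; simp [PySem.List.pyGet?] at h
  have : 0 < my_list.length := List.length_pos_iff.mpr hne
  simp [List.length_dropLast]; omega

-- ===== PORT B =====
-- the backward scan: largest i such that everything from i on is '+'
def rlpScan (my_list : List String) (i : Nat) : Nat :=
  if 0 < i ∧ my_list[i - 1]? = some "+" then rlpScan my_list (i - 1) else i
termination_by i
decreasing_by omega

-- `del my_list[i:]` then `return my_list` returns the first i elements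
def remove_last_pluses_alt (my_list : List String) : List String :=
  my_list.take (rlpScan my_list my_list.length)

-- ===== PRECONDITION & SPEC =====
-- Pre_ excludes exactly the empty list, on which Python A raises IndexError at my_list[-1].
def Pre_remove_last_pluses (my_list : List String) : Prop := my_list ≠ []
instance (my_list : List String) : Decidable (Pre_remove_last_pluses my_list) := by
  unfold Pre_remove_last_pluses; infer_instance
def pvWitness_remove_last_pluses : List String := ["a", "+"]

-- On the empty list A raises IndexError from my_list[-1]; B returns [].
def Raises_remove_last_pluses (my_list : List String) : Prop := my_list = []
instance (my_list : List String) : Decidable (Raises_remove_last_pluses my_list) := by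
  unfold Raises_remove_last_pluses; infer_instance
def pvRaiseWitness_remove_last_pluses : List String := []
def pvRaiseWitnessOut_remove_last_pluses : List String := []

def Spec_remove_last_pluses (my_list : List String) (out : List String) : Prop := out = remove_last_pluses_alt my_list
instance (my_list : List String) (out : List String) : Decidable (Spec_remove_last_pluses my_list out) := by unfold Spec_remove_last_pluses; infer_instance

-- ===== CLAIM (what is proved, stated in full; the proofs are below) =====
def Claim_equal_remove_last_pluses : Prop := ∀ (my_list : List String), Dom_remove_last_pluses my_list → Pre_remove_last_pluses my_list → Spec_remove_last_pluses my_list (remove_last_pluses my_list)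
def Claim_raises_remove_last_pluses : Prop := (∀ (my_list : List String), Dom_remove_last_pluses my_list → Raises_remove_last_pluses my_list → ¬ Pre_remove_last_pluses my_list) ∧ (Dom_remove_last_pluses (pvRaiseWitness_remove_last_pluses) ∧ Raises_remove_last_pluses (pvRaiseWitness_remove_last_pluses) ∧ remove_last_pluses_alt (pvRaiseWitness_remove_last_pluses) = pvRaiseWitnessOut_remove_last_pluses)

-- ===== LEMMAS AND PROOFS =====

theorem rlpScan_le (l : List String) (i : Nat) : rlpScan l i ≤ i := by
  induction i using Nat.strong_induction_on with
  | _ i ih =>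
    unfold rlpScan
    split
    · next h => exact le_trans (ih (i - 1) (by omega)) (by omega)
    · exact le_rfl

-- the scan never looks at the last element once i ≤ length - 1, so it agrees on dropLast
theorem rlpScan_dropLast (l : List String) (i : Nat) (h : i ≤ l.dropLast.length) :
    rlpScan l i = rlpScan l.dropLast i := by
  induction i using Nat.strong_induction_on with
  | _ i ih =>
    unfold rlpScan
    have hget : 0 < i → l.dropLast[i - 1]? = l[i - 1]? := by
      intro hi
      rw [List.getElem?_dropLast]
      have : i - 1 + 1 < l.length := by simp [List.length_dropLast] at h; omega
      simp [this]
    by_cases hc : 0 < i ∧ l[i - 1]? = some "+"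
    · rw [if_pos hc, if_pos (by exact ⟨hc.1, by rw [hget hc.1]; exact hc.2⟩)]
      exact ih (i - 1) (by omega) (by omega)
    · rw [if_neg hc, if_neg (by intro ⟨h1, h2⟩; exact hc ⟨h1, by rw [← hget h1]; exact h2⟩)]

theorem rlp_main (l : List String) (hne : l ≠ []) :
    remove_last_pluses l = remove_last_pluses_alt l := by
  induction l using remove_last_pluses.induct with
  | case1 l h hd ih =>
    -- last is "+", dropLast nonempty
    rw [remove_last_pluses, dif_pos h, dif_pos hd, ih hd]
    unfold remove_last_pluses_alt
    have hlen : 0 < l.length := List.length_pos_iff.mpr (by intro he; subst he; simp [PySem.List.pyGet?] at h)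
    have hlast : l[l.length - 1]? = some "+" := by
      rw [← List.getLast?_eq_getElem?, ← PySem.List.pyGet?_neg_one]; exact h
    have hd' : l.length - 1 = l.dropLast.length := by simp [List.length_dropLast]
    have hR : rlpScan l l.length = rlpScan l.dropLast l.dropLast.length := by
      rw [rlpScan, if_pos ⟨hlen, hlast⟩, rlpScan_dropLast l (l.length - 1) (by omega), hd']
    rw [hR]
    have hk : rlpScan l.dropLast l.dropLast.length ≤ l.dropLast.length := rlpScan_le _ _
    generalize hs : rlpScan l.dropLast l.dropLast.length = k at hk ⊢
    rw [List.dropLast_eq_take, List.take_take]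
    congr 1
    rw [List.length_dropLast] at hk
    omega
  | case2 l h hd =>
    -- last is "+", dropLast empty: l is the singleton ["+"]
    rw [remove_last_pluses, dif_pos h, dif_neg hd]
    rw [not_not] at hd
    have hne' : l ≠ [] := by intro he; subst he; simp [PySem.List.pyGet?] at h
    have hlen : l.length = 1 := by
      have h1 := congrArg List.length hd
      simp [List.length_dropLast] at h1
      have h2 := List.length_pos_iff.mpr hne'
      omega
    have hlast : l[l.length - 1]? = some "+" := by
      rw [← List.getLast?_eq_getElem?, ← PySem.List.pyGet?_neg_one]; exact h
    unfold remove_last_pluses_alt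
    rw [rlpScan, if_pos ⟨by omega, hlast⟩, hlen]
    rw [rlpScan]
    simp
  | case3 l h =>
    -- last is not "+"
    rw [remove_last_pluses, dif_neg h]
    unfold remove_last_pluses_alt
    rw [rlpScan, if_neg]
    · exact (List.take_length (l := l)).symm
    · intro ⟨h1, h2⟩
      apply h
      rw [PySem.List.pyGet?_neg_one, List.getLast?_eq_getElem?]
      exact h2

-- ===== VERDICT (by name: the statement is the Claim_ definition above) =====
theorem remove_last_pluses_spec : Claim_equal_remove_last_pluses := by
  intro l _ hpre
  unfold Spec_remove_last_pluses
  exact rlp_main l hpre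

def remove_last_pluses_raises : Claim_raises_remove_last_pluses := by
  unfold Claim_raises_remove_last_pluses
  exact ⟨by intro l _ hr hp; exact hp hr,
         by refine ⟨by decide, rfl, ?_⟩
            simp [remove_last_pluses_alt, pvRaiseWitness_remove_last_pluses,
                  pvRaiseWitnessOut_remove_last_pluses]⟩
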